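/-
  `u_step`: one instruction of the flat user machine, by computing `Sem.wpUser` of its decoded term.

      u_wp_simp hm [facts]     the `simp` call that runs a `wpUser` goal up to the next node that needs a decision
      u_wp_loop hm [facts]     run, decide the node (undefined flags, observation, load, store, side condition, branch,
                               a `match` that does not evaluate), continue in place; the goals come out in program order
      u_body [facts]           goal `∀ m, Abs L m u → wpUser L μ body (fun _ u' => Q u') (fun _ _ => False) (u.setRip next)`
      u_step hd [facts]        goal `User.Step L μ u Q`, `hd : User.Decodes L μ u (Sem.instr keep len body)`
                               (from a decode fact / a function's code: `u_step_at`, `u_step_code`, UserX/StepAt.lean)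
      u_ext_rule               the extension point for rules about whole bodies (the SSE forms)

  WHAT IS LEFT, in this order: the side conditions in program order —
      side_has         L.Has a n              one per memory access (closed at once when it is a hypothesis; the store of a
                                              read-modify-write finds the fact of its load)
      side_req         c = true               a `require` that does not evaluate
      side_canonical   t < 40000000H          the target of an indirect branch or of RET
      side_nofault     False                  a path that ends in a fault (DIV / IDIV: under `hopt1 : Alu.div … = none`)
  — then `cont`: `Q u'`, `u'` the start state under a nest of setters in normal form; twice for a branch whose condition
  does not evaluate (`hc1` / `¬ hc1`). UNDEFINED flags are `fv1 : Flag → Bool`, universally quantified.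
  The caller's postcondition is a VARIABLE while the instruction runs (`u_protect_post`): no rule touches it.

  `hm : Abs L m u'` is the relation of the machine the last observation introduced: its facts (`hm.in64`, `hm.cpl` …,
  UserX/Step.lean has the list) evaluate what the body observes. `facts` are rewrite rules of the caller: the hypotheses
  about the start state (`u.reg .rax = …`, `u.rip = …`, `u.mem.readLE a 8 = …`) and about the processor (`μ.vendor = .intel`).
-/
import UserX.Step
import Lean

namespace X86

/-- A branch whose condition does not evaluate: both arms, each under its case. -/
theorem ite_intro {c : Prop} [Decidable c] {p q : Prop} (hp : c → p) (hq : ¬ c → q) : if c then p else q := by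
  by_cases h : c
  · rw [if_pos h]
    exact hp h
  · rw [if_neg h]
    exact hq h

end X86

namespace UserX
open Lean Elab Tactic Meta

/-- `u_at tag => tac`: run `tac` on the goal tagged `tag`, IN PLACE (the goals it leaves take that goal's position). -/
elab "u_at " tag:ident " => " tac:tacticSeq : tactic => do
  let gs ← getUnsolvedGoals
  let want := tag.getId
  let mut idx : Option Nat := none
  for i in [0:gs.length] do
    if idx.isNone && (← gs[i]!.getTag) == want then
      idx := some i
  if idx.isNone then
    for i in [0:gs.length] do
      if idx.isNone && (← gs[i]!.getTag).eraseMacroScopes == want.eraseMacroScopes then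
        idx := some i
  let some i := idx | throwError "u_at: no goal tagged {want}"
  let g := gs[i]!
  setGoals [g]
  evalTactic tac
  let gs' ← getUnsolvedGoals
  setGoals (gs.take i ++ gs' ++ gs.drop (i + 1))

/-- Does the goal continue the proof? Its target is the (generalised) postcondition `u_Q …` or still a `wpUser` — as
opposed to a side condition (`L.Has a n`, a `require`, a branch target's bound, `False` on a path that ends in a fault). -/
def isMainGoal (g : MVarId) : MetaM Bool := g.withContext do
  let t := (← instantiateMVars (← g.getType)).cleanupAnnotations
  if t.isAppOf ``X86.Sem.wpUser then
    return true
  match t.getAppFn with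
  | .fvar f => return (← f.getUserName) == `u_Q
  | _ => return false

/-- The side conditions first, the goals that continue the proof last; both in program order (the loop works in
place). Side conditions keep the tag the loop gave them (`side_has`, `side_req`, `side_canonical`; `side_nofault` for
`False` on a path that ends in a fault; `side` for one a registered rule left), the others are `cont`; macro scopes are
erased, so that `case side_has => …` finds them. -/
elab "u_reorder" : tactic => do
  let gs ← getUnsolvedGoals
  let mut mains : Array MVarId := #[]
  let mut sides : Array MVarId := #[]
  for g in gs do
    let mut tag := (← g.getTag).eraseMacroScopes
    if ← isMainGoal g then
      g.setTag `cont
      mains := mains.push g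
    else
      let known := tag.components.any fun c => c.toString.startsWith "side"
      if (← instantiateMVars (← g.getType)).cleanupAnnotations.isConstOf ``False then
        tag := `side_nofault
      else if !known then
        tag := `side
      g.setTag tag
      sides := sides.push g
  setGoals (sides.toList ++ mains.toList)

/-- Clear the values of UNDEFINED flags (`fv1 : Flag → Bool`) that nothing mentions any more: a later instruction has
written all six flags. -/
elab "u_clear_unused" : tactic => do
  let gs ← getUnsolvedGoals
  let mut out : List MVarId := []
  for g in gs do
    let mut cur := g
    let decls := (← g.getDecl).lctx.getFVarIds
    for f in decls.reverse do
      let isFlagValue ← cur.withContext do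
        let some d := (← getLCtx).find? f | pure false
        let ty ← instantiateMVars d.type
        pure (ty.isArrow && ty.bindingDomain!.isConstOf ``X86.Flag && ty.bindingBody!.isConstOf ``Bool)
      if isFlagValue then
        cur ← cur.tryClear f
    out := out ++ [cur]
  setGoals out

/-- If the `Sem` term under the `wpUser` of the goal is a `match` whose discriminant did not evaluate (DIV / IDIV: the
quotient's `Option`; BSF / BSR: the scan's), split THAT match: one goal per arm, each with the equation
`discriminant = pattern` as its last hypothesis. -/
elab "u_split_match" : tactic => do
  let g ← getMainGoal
  let t := (← instantiateMVars (← g.getType)).cleanupAnnotations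
  unless t.isAppOfArity ``X86.Sem.wpUser 7 do
    throwError "u_split_match: not a wpUser goal"
  let s := t.getArg! 3
  let some _ ← matchMatcherApp? s | throwError "u_split_match: the term is not a match"
  let oldDecls := (← g.getDecl).lctx.getFVarIds
  let gs ← Split.splitMatch g s
  -- accessible names for what the split introduced: `hopt1` the equation, `qr1` a pattern variable; the generalised
  -- discriminant is cleared when nothing mentions it
  let mut out : List MVarId := []
  for g' in gs do
    let mut cur := g'
    let decls := (← g'.getDecl).lctx.getFVarIds.filter fun f => !oldDecls.contains f
    for f in decls do
      let ty ← cur.withContext do inferType (mkFVar f)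
      let isProp ← cur.withContext do isProp ty
      if isProp then
        cur ← cur.rename f `hopt1
      else if ty.isAppOf ``Option then
        cur ← (cur.tryClear f)
      else
        cur ← cur.rename f `qr1
    out := out ++ [cur]
  replaceMainGoal out

/-- The postcondition of the `wpUser` goal becomes a variable `u_Q` (with `u_hQ : post = u_Q`) while the instruction
runs: no rewrite rule of the stepping set ever touches the caller's postcondition — which may be the whole rest of a
program. `u_restore_post` puts it back. -/
elab "u_protect_post" : tactic => do
  let g ← getMainGoal
  let t := (← instantiateMVars (← g.getType)).cleanupAnnotations
  unless t.isAppOfArity ``X86.Sem.wpUser 7 do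
    throwError "u_protect_post: not a wpUser goal"
  let post := t.getArg! 4
  let (_, g') ← g.generalize #[{ expr := post, xName? := some `u_Q, hName? := some `u_hQ }]
  replaceMainGoal [g']

/-- Put the caller's postcondition back in every goal (see `u_protect_post`). -/
elab "u_restore_post" : tactic => do
  let gs ← getUnsolvedGoals
  let mut out : List MVarId := []
  for g in gs do
    let lctx := (← g.getDecl).lctx
    match lctx.findFromUserName? `u_hQ with
    | some d =>
      let g' ← subst g d.fvarId
      out := out ++ [g']
    | none => out := out ++ [g]
  setGoals out

/-- Head-β of every goal. -/
elab "u_beta" : tactic => do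
  let gs ← getUnsolvedGoals
  let gs' ← gs.mapM fun g => do
    let t := (← instantiateMVars (← g.getType)).cleanupAnnotations
    g.replaceTargetDefEq t.headBeta
  setGoals gs'

/-- Is `x` closed data whose comparison may be evaluated: a constructor without arguments of an enumeration
(`Reg.rbx`, `Seg.fs`) or a numeral (`233 : UInt8`)? -/
def isClosedAtom (env : Environment) (x : Expr) : Bool :=
  let x := x.consumeMData
  if x.isAppOfArity ``OfNat.ofNat 3 then
    (x.getArg! 1).isRawNatLit
  else
    match x.constName? with
    | some n => (env.find? n).any fun info => info.isCtor
    | none => false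

open Simp in
/-- Evaluate `a == b` / `a != b` on two closed atoms; the result carries a `decide` proof. -/
def reduceBoolCmp (declName : Name) (e : Expr) : SimpM Step := do
  unless e.isAppOfArity declName 4 do
    return .continue
  let env ← getEnv
  unless isClosedAtom env e.appFn!.appArg! && isClosedAtom env e.appArg! do
    return .continue
  let r ← withDefault (whnf e)
  unless r.isConstOf ``Bool.true || r.isConstOf ``Bool.false do
    return .continue
  let prf ← mkDecideProof (← mkEq e r)
  return .done { expr := r, proof? := some prf }

/-- `a == b` for two constructors without arguments of an enumeration (`Reg.rbx == Reg.rax`, `Seg.ds == Seg.fs`) or two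
numerals (`(233 : UInt8) == 235`): its value, with a `decide` proof. (The derived `BEq` instances of the model's
enumerations are not `LawfulBEq`, so `beq_iff_eq` does not apply; core has no simproc for `==` on `UInt8` / `UInt64`.) -/
simproc_decl reduceBEqCtor ((_ == _ : Bool)) := reduceBoolCmp ``BEq.beq

/-- The same for `a != b`. -/
simproc_decl reduceBNeCtor ((_ != _ : Bool)) := reduceBoolCmp ``bne

end UserX

/-- `PlainAttr` of a closed attribute record. -/
macro "u_plain" : tactic => `(tactic| first
  | exact X86.User.PlainAttr.default
  | exact X86.User.PlainAttr.data _
  | exact X86.User.PlainAttr.rmw _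
  | exact X86.plainAttr_of _ rfl rfl rfl rfl
  | (refine X86.plainAttr_of _ ?_ ?_ ?_ ?_ <;> simp))

/-- `FlagsOK` of the flags of the current state: a nest of status-flag writes over flags known to be fine. -/
syntax "u_flagsok" : tactic
macro_rules
  | `(tactic| u_flagsok) => `(tactic| first
    | (with_reducible assumption)
    | ((with_reducible refine X86.User.FlagsOK.setStatus ?fl _)
       case fl => u_flagsok)
    | ((with_reducible refine X86.User.FlagsOK.update ?fl _ ?st)
       case fl => u_flagsok
       case st => (intro p hp; simp at hp; rcases hp with h | h | h | h | h | h <;> (rw [h]; rfl)))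
    | ((with_reducible refine X86.User.FlagsOK.set ?fl _ _ ?st)
       case st => rfl
       case fl => u_flagsok)
    | ((with_reducible refine X86.User.FlagsOK.set_other ?fl _ _ ?h1 ?h2 ?h3 ?h4)
       case h1 => decide
       case h2 => decide
       case h3 => decide
       case h4 => decide
       case fl => u_flagsok))

/-- `FlagsOK u'.flags` for the state `u'` an instruction has built so far. -/
macro "u_flagsok_state" : tactic => `(tactic| (
  try simp (implicitDefEqProofs := false) only [X86.User.State.flags_setReg, X86.User.State.flags_setRip,
    X86.User.State.flags_setFlags, X86.User.State.flags_setMem, X86.User.State.flags_setMxcsr,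
    X86.User.State.writePart_eq, X86.User.State.writeHi8_eq]
  u_flagsok))

/-! ### The stepping set: everything that does not depend on the goal

Collected ONCE, in the simp set `u_step` (and its simproc set `u_step_proc`): a `simp only [a, b, …]` call resolves and
pre-processes every name of its list every time it runs — measured 95 ms per call for the 170 names below, against 15 ms
of rewriting. -/

attribute [u_step_proc] UserX.wpUnfoldU UserX.reduceWordSext UserX.reduceToBitVecLit UserX.reduceBEqCtor
  UserX.reduceBNeCtor
  UInt64.reduceLT UInt64.reduceLE reduceIte reduceCtorEq
  Nat.reduceMul Nat.reduceAdd Nat.reduceSub Nat.reduceDiv Nat.reduceMod Nat.reduceBEq Nat.reduceBNe Nat.reduceEqDiff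
  Nat.reduceLT Nat.reduceLeDiff Nat.reduceGT Nat.reducePow
  BitVec.reduceSetWidth BitVec.reduceToNat BitVec.reduceOfNat BitVec.reduceSignExtend BitVec.reduceZeroExtend

attribute [u_step_proc ↓] Word.addrNorm Word.addrNormSub

attribute [u_step]
  -- what the decoder produced
  X86.Encoding.lenW X86.Encoding.registerForm X86.Encoding.memoryForm X86.Operand.width X86.Operand.isMem
  X86.Operand.isImm X86.Width.bits
  X86.Operand.atWidth_reg X86.Operand.atWidth_mem X86.Operand.atWidth_regHi8 X86.Operand.atWidth_imm
  X86.accLo_eq X86.accHi_w8 X86.accHi_w16 X86.accHi_w32 X86.accHi_w64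
  X86.Word.truncAddr_64 X86.Word.truncAddr_32 X86.Word.truncAddr_16
  X86.Vendor.intel_beq_amd X86.Vendor.amd_beq_intel X86.Vendor.intel_beq_intel X86.Vendor.intel_bne_amd
  X86.Vendor.amd_bne_intel
  -- words
  UInt64.mul_one UInt64.add_zero UInt64.zero_add
  -- values of the typed ALU
  X86.Alu.add_val X86.Alu.sub_val X86.Alu.adc_val X86.Alu.sbb_val X86.Alu.inc_val X86.Alu.dec_val
  X86.Alu.neg_val X86.Alu.logic_and_val X86.Alu.logic_or_val X86.Alu.logic_xor_val X86.Alu.mul_lo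
  X86.Alu.shift_shl_val X86.Alu.shift_shr_val X86.Alu.shift_sar_val X86.Alu.shiftCount_64 X86.Alu.shiftCount_32
  X86.Alu.shiftCount_16 X86.Alu.shiftCount_8
  X86.Alu.add_fill X86.Alu.adc_fill X86.Alu.sub_fill X86.Alu.sbb_fill X86.Alu.inc_fill X86.Alu.dec_fill
  X86.Alu.neg_fill
  X86.Alu.add_writesAll X86.Alu.adc_writesAll X86.Alu.sub_writesAll X86.Alu.sbb_writesAll X86.Alu.neg_writesAll
  X86.Alu.logic_fill_writesAll X86.Alu.mul_fill_writesAll X86.Alu.shift_fill_writesAll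
  X86.Word.part8_writePart16 X86.Word.hi8_writeHi8 X86.Word.hi8_writePart8 X86.Word.part8_writeHi8
  X86.Word.writePart_writePart
  -- booleans, options, numbers
  Bool.not_true Bool.not_false Bool.and_true Bool.true_and Bool.and_false Bool.false_and Bool.or_true
  Bool.true_or Bool.or_false Bool.false_or Bool.false_eq_true Bool.true_eq_false Bool.and_self Bool.or_self
  Bool.not_not if_true if_false ite_true ite_false decide_true decide_false
  decide_eq_true_eq cond_true cond_false beq_self_eq_true beq_iff_eq bne_iff_ne ne_eq not_true_eq_false
  not_false_eq_true and_true true_and and_false false_and or_true true_or or_false false_or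
  eq_self_iff_true true_implies implies_true forall_const
  Option.some_beq_some Option.some_beq_none Option.none_beq_some Option.none_beq_none Option.isSome_some
  Option.isSome_none Option.isNone_some Option.isNone_none Option.getD_some Option.getD_none
  Option.some.injEq
  BitVec.setWidth_eq id_eq Function.comp_apply Bool.and_eq_true Bool.or_eq_true Bool.not_eq_true'

/-- The `simp` call that runs a `wpUser` goal up to the next node that needs a decision: the stepping set, the normal
form of the state, literal arithmetic, the facts of the machine `hm` of the last observation, the caller's facts. -/
syntax "u_wp_simp " ident " [" Lean.Parser.Tactic.simpLemma,* "]" : tactic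
macro_rules
  | `(tactic| u_wp_simp $hm [$extra,*]) => `(tactic|
    simp (maxDischargeDepth := 4) (implicitDefEqProofs := false) only [u_step, u_norm, word_lit, user_observe,
      X86.User.Abs.in64 $hm, X86.User.Abs.mode $hm, X86.User.Abs.cpl $hm, X86.User.Abs.longModeActive $hm,
      X86.User.Abs.stackAddressBits $hm, X86.User.Abs.defaultAddressBits $hm, X86.User.Abs.defaultOperandBits $hm,
      X86.User.Abs.nearBranchBits $hm, X86.User.Abs.mpxEnabled $hm, X86.User.Abs.shadowStackEnabled $hm,
      X86.User.Abs.operandBits $hm, X86.User.Abs.addressBits $hm, X86.User.Abs.isCanonical $hm,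
      X86.User.Abs.endbranch $hm, X86.User.Abs.endbranchEnabled $hm, X86.User.Abs.obs_rip $hm,
      X86.User.Abs.obs_flags $hm, X86.User.Abs.obs_mxcsr $hm,
      X86.User.Abs.reg $hm, X86.User.Abs.cr0 $hm, X86.User.Abs.cr4 $hm, X86.User.Abs.efer $hm, $extra,*])

/-- Count the rounds of the loop that an observation costs (a stop, an introduction, another `simp` pass):
`set_option trace.UserX.env true` prints one line per round. -/
elab "u_note_round" : tactic => do
  trace[UserX.env] "an observation: the machine is introduced, another pass"

/-- `u_norm (at h)?`: put a user state written as a nest of setters into THE normal form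
`((((u.setReg r₁ x₁) … .setReg rₖ xₖ).setMem μ).setFlags f).setRip a` (registers in register-number order, a later write
of the same component overwrites, the flags ONE layer deep when the last result defines all six) and evaluate the
projections `.reg r` / `.part w r` / `.rip` / `.flags` / `.mem` of such a nest. -/
syntax "u_norm" (Lean.Parser.Tactic.location)? : tactic
macro_rules
  | `(tactic| u_norm $[$loc]?) => `(tactic|
    simp (implicitDefEqProofs := false) only [u_norm, X86.User.State.reg_setReg, X86.User.State.reg_setRip,
      X86.User.State.reg_setFlags, X86.User.State.reg_setMem, X86.User.State.rip_setReg, X86.User.State.rip_setRip,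
      X86.User.State.rip_setFlags, X86.User.State.rip_setMem, X86.User.State.flags_setReg, X86.User.State.flags_setRip,
      X86.User.State.flags_setFlags, X86.User.State.flags_setMem, X86.User.State.mem_setReg, X86.User.State.mem_setRip,
      X86.User.State.mem_setFlags, X86.User.State.mem_setMem, X86.User.State.part_setReg, X86.User.State.part_setRip,
      X86.User.State.part_setFlags, X86.User.State.part_setMem, X86.User.State.writePart_eq, X86.User.State.writeHi8_eq,
      X86.Alu.add_writesAll, X86.Alu.adc_writesAll, X86.Alu.sub_writesAll, X86.Alu.sbb_writesAll, X86.Alu.neg_writesAll,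
      X86.Alu.logic_fill_writesAll, X86.Alu.mul_fill_writesAll, reduceCtorEq, if_true, if_false, reduceIte] $[$loc]?)

/-- The `wpUser` loop: run to the next node, decide it, continue in the state it leaves; at the end, the step's
postcondition. Side conditions are tagged `side…` and come BEFORE the goal that continues, in program order.
Names it introduces (accessible: made without macro scopes; the goal tags `?cont` … are hygienic, so that a
recursive call does not re-use the hole of its caller): `fv1` the values of the flags an instruction leaves
UNDEFINED, `m1` / `hm1` the machine of an observation (cleared at the end), `hhas1` the range fact of a memory access
(cleared at the end), `hc1` the condition of a branch that did not evaluate, `hopt1` the equation of a split `match`. -/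
syntax "u_wp_loop " ident " [" Lean.Parser.Tactic.simpLemma,* "]" : tactic
macro_rules
  | `(tactic| u_wp_loop $hm [$extra,*]) => do
    let fv1 := Lean.mkIdent `fv1
    let x1 := Lean.mkIdent `x1
    let hval1 := Lean.mkIdent `hval1
    let bit1 := Lean.mkIdent `bit1
    let hx1 := Lean.mkIdent `hx1
    let hhas1 := Lean.mkIdent `hhas1
    let m1 := Lean.mkIdent `m1
    let hm1 := Lean.mkIdent `hm1
    let hc1 := Lean.mkIdent `hc1
    `(tactic| (
    try u_wp_simp $hm [$extra,*]
    -- observations answered through a named accessor left `UAny L u (…)` around what follows them (the model's rules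
    -- `@[user_observe]`, X86/Derived/User/Wp.lean)
    repeat (with_reducible refine X86.Sem.UAny.intro ?_)
    first
    -- UNDEFINED flags and values: the rules of X86/Derived/User/UndefFlags.lean
    | ((with_reducible refine X86.Insn.wpUser_resolve _ ?flagsok ?cont)
       case flagsok => u_flagsok_state
       u_at cont => (intro $fv1:ident; u_wp_loop $hm [$extra,*]))
    | ((with_reducible refine X86.Insn.wpUser_commitFlags _ ?flagsok ?cont)
       case flagsok => u_flagsok_state
       u_at cont => (intro $fv1:ident; u_wp_loop $hm [$extra,*]))
    | ((with_reducible refine X86.Sem.wpUser_commitStatus _ _ ?flagsok ?cont)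
       case flagsok => u_flagsok_state
       u_at cont => (intro $fv1:ident; u_wp_loop $hm [$extra,*]))
    | ((with_reducible refine X86.Insn.wpUser_MulOut_commitFlags _ ?flagsok ?cont)
       case flagsok => u_flagsok_state
       u_at cont => (intro $fv1:ident; u_wp_loop $hm [$extra,*]))
    | ((with_reducible refine X86.Insn.wpUser_DoubleShiftOut_resolve _ ?flagsok ?cont)
       case flagsok => u_flagsok_state
       u_at cont => (intro $fv1:ident $x1:ident $hval1:ident; u_wp_loop $hm [$extra,*]))
    | ((with_reducible refine X86.Insn.wpUser_unknownBit ?cont)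
       u_at cont => (intro $bit1:ident; u_wp_loop $hm [$extra,*]))
    | ((with_reducible refine X86.Insn.wpUser_unknownWord _ ?cont)
       u_at cont => (intro $x1:ident $hx1:ident; u_wp_loop $hm [$extra,*]))
    | ((with_reducible refine X86.Insn.wpUser_unknownBV _ ?cont)
       u_at cont => (intro $x1:ident; u_wp_loop $hm [$extra,*]))
    -- memory: the range fact is handed on, so that the store of a read-modify-write finds it
    | ((with_reducible refine X86.Sem.wpUser_load_has _ _ (X86.User.Layout.readable_of ?via ?pa ?pos ?side_has) ?cont)
       case via => rfl
       case pa => u_plain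
       case pos => decide
       u_at side_has => (first | (with_reducible assumption) | skip)
       u_at cont => (intro $hhas1:ident; u_wp_loop $hm [$extra,*]; all_goals (try clear $hhas1)))
    | ((with_reducible refine X86.Sem.wpUser_store_has _ _ (X86.User.Layout.writable_of ?via ?pa ?pos ?side_has) ?cont)
       case via => rfl
       case pa => u_plain
       case pos => decide
       u_at side_has => (first | (with_reducible assumption) | skip)
       u_at cont => (intro $hhas1:ident; u_wp_loop $hm [$extra,*]; all_goals (try clear $hhas1)))
    -- an observation: every machine in the relation; its facts evaluate the observation in the next pass
    | ((with_reducible refine X86.Sem.wpUser_env_intro _ _ ?cont)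
       u_at cont => (
         u_note_round
         intro $m1:ident $hm1:ident
         u_wp_loop $hm1 [$extra,*]
         all_goals (try clear $hm1)
         all_goals (try clear $m1)))
    | ((with_reducible refine X86.Sem.wpUser_read_oracleIdx_intro _ _ ?cont)
       u_at cont => (
         intro $m1:ident $hm1:ident
         u_wp_loop $hm1 [$extra,*]
         all_goals (try clear $hm1)
         all_goals (try clear $m1)))
    -- a side condition and the rest
    | ((with_reducible refine And.intro ?side_req ?cont)
       u_at side_req => (first
         | (with_reducible refine X86.User.Abs.isCanonical_eq_true $hm _ ?side_canonical)
         | (rw [X86.User.Flags.update_one]; u_flagsok)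
         | u_flagsok
         | skip)
       u_at cont => (u_wp_loop $hm [$extra,*]))
    -- a branch whose condition does not evaluate
    | ((with_reducible refine X86.ite_intro ?cont ?cont2)
       u_at cont2 => (intro $hc1:ident; u_wp_loop $hm [$extra,*])
       u_at cont => (intro $hc1:ident; u_wp_loop $hm [$extra,*]))
    -- a `match` whose discriminant does not evaluate (the quotient of DIV / IDIV, the index of BSF / BSR)
    | (u_split_match
       all_goals (u_wp_loop $hm [$extra,*]))
    | skip))

/-- **The extension point for rules about whole instruction bodies** (the SSE forms: `UserX/Sse*.lean` state one
implication-style rule per decoded body, `… → Q () u' → wpUser L μ (Insn.MOVSS.loadBody e dst src) Q E u`). A package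
registers its rules by adding alternatives:

    macro_rules | `(tactic| u_ext_rule) => `(tactic| first | apply Sse.wpUser_movss_load … | apply …)

`u_body` tries `u_ext_rule` ONCE, on the body as decoded (before anything is unfolded); when a rule applies, every goal
it leaves is normalised by the stepping set (addresses: `base ± literal`), the side conditions come first. With no
rule registered it fails at once and the body is computed by unfolding. -/
syntax "u_ext_rule" : tactic
macro_rules
  | `(tactic| u_ext_rule) => `(tactic| fail "no rule registered")

/-- **The extension point for tidying the context at the end of a step**: a package whose rules introduce variables (the
opaque values of the SSE rules: UserX/SseStep.lean) registers here the tactic that clears those nothing mentions any more.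
`u_body` runs it on all goals after `u_clear_unused`; with nothing registered it does nothing. -/
syntax "u_ext_tidy" : tactic
macro_rules
  | `(tactic| u_ext_tidy) => `(tactic| skip)

/-- `u_body [facts]`: the goal `∀ m, Abs L m u → wpUser L μ body (fun _ u' => Q u') (fun _ _ => False) (u.setRip next)`
that `User.Step.of_instr` / `Step.of_isInsn_at` / `Step.of_codeNat` leave. Computes the instruction's effect; leaves the
side conditions (in program order) and, last, `Q u'`. -/
syntax "u_body" " [" Lean.Parser.Tactic.simpLemma,* "]" : tactic
macro_rules
  | `(tactic| u_body [$extra,*]) => `(tactic| (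
    intro u_m0 u_hm0
    u_protect_post
    -- `FlagsOK` of the start state's flags: over the base state, and in the caller's vocabulary (`u.flags = fl`)
    have u_hfl0 := X86.User.Abs.flagsOK u_hm0
    try simp (implicitDefEqProofs := false) only [X86.User.State.flags_setReg, X86.User.State.flags_setRip,
      X86.User.State.flags_setFlags, X86.User.State.flags_setMem, X86.User.State.flags_setMxcsr] at u_hfl0
    have u_hfl1 := u_hfl0
    try simp (implicitDefEqProofs := false) only [$extra,*] at u_hfl1
    first
    | (u_ext_rule
       all_goals (try u_wp_simp u_hm0 [$extra,*])
       all_goals (repeat (with_reducible refine X86.Sem.UAny.intro ?_))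
       -- a side condition of a rule that is a hypothesis once it is normalised (the loop does the same for its own)
       all_goals (try (with_reducible assumption)))
    | u_wp_loop u_hm0 [$extra,*]
    u_reorder
    u_restore_post
    u_beta
    u_clear_unused
    u_ext_tidy
    all_goals (try clear u_hfl1)
    all_goals (try clear u_hfl0)
    all_goals (try clear u_hm0)
    all_goals (try clear u_m0)))

namespace UserX
open Lean Meta Elab Tactic

/-- Is `t` an equation the stepper can use as a rewrite rule about the START state: `u.reg r = _`, `u.part w r = _`,
`u.hi8 r = _`, `u.rip = _`, `u.flags = _`, `u.mxcsr = _`, `f.readLE a k = _` (a load out of a known memory),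
`μ.vendor = _`? -/
def isStateFact (t : Expr) : Bool :=
  match t.eq? with
  | some (_, lhs, _) =>
    let fn := lhs.getAppFn
    fn.isConstOf ``X86.User.State.reg || fn.isConstOf ``X86.User.State.part || fn.isConstOf ``X86.User.State.hi8 ||
    fn.isConstOf ``X86.User.State.rip || fn.isConstOf ``X86.User.State.flags || fn.isConstOf ``X86.User.State.mxcsr ||
    fn.isConstOf ``X86.User.Mem.readLE || fn.isConstOf ``X86.Microarch.vendor
  | none => false

/-- `u_body_ctx [facts]`: `u_body` with, besides `facts`, every hypothesis of the context that is an equation about the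
start state (`isStateFact`). -/
elab "u_body_ctx" " [" facts:Lean.Parser.Tactic.simpLemma,* "]" : tactic => withMainContext do
  let mut ids : Array (TSyntax `Lean.Parser.Tactic.simpLemma) := facts.getElems
  for d in ← getLCtx do
    if d.isImplementationDetail then
      continue
    let t := (← instantiateMVars d.type).cleanupAnnotations
    if isStateFact t then
      let id := mkIdent d.userName
      ids := ids.push (← `(Lean.Parser.Tactic.simpLemma| $id:ident))
  evalTactic (← `(tactic| u_body [$ids,*]))

end UserX

/-- `u_step hd [facts]`: the goal `User.Step L μ u Q`, the decoding `hd : User.Decodes L μ u (Sem.instr keep len body)`. -/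
syntax "u_step " term:max " [" Lean.Parser.Tactic.simpLemma,* "]" : tactic
macro_rules
  | `(tactic| u_step $hd [$extra,*]) => `(tactic| (
    refine X86.User.Step.of_instr _ _ _ $hd ?_
    u_body [$extra,*]))
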